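-- pv_equiv track=rewrite | github.com/tylermorg254/VisionAIRecaptchaSolver | src/vision_ai_recaptcha_solver/detector/grid_utils.py | calculate_4x4_cells
-- ===== SOURCE A (Python) =====
-- def calculate_4x4_cells(
--     bbox: tuple[int, int, int, int],
--     grid_size: int = 450,
-- ) -> list[int]:
--     """Calculate all 1-indexed cells occupied by a bounding box in a 4x4 grid.
--
--     Args:
--         bbox: Bounding box as (x1, y1, x2, y2).
--         grid_size: Total size of the grid in pixels.
--
--     Returns:
--         Sorted list of cell numbers from 1 to 16.
--     """
--     if grid_size <= 0:
--         raise ValueError(f"grid_size must be positive, got {grid_size}")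
--     x1, y1, x2, y2 = bbox
--     cell_size = grid_size / 4
--
--     # Get the four corners
--     corners = [(x1, y1), (x2, y1), (x1, y2), (x2, y2)]
--     corner_cells = []
--
--     for x, y in corners:
--         cell = _point_to_4x4_cell(x, y, cell_size)
--         if cell is not None:
--             corner_cells.append(cell)
--
--     if not corner_cells:
--         return []
--
--     return get_occupied_cells(corner_cells, grid_cols=4)
--
-- def _point_to_4x4_cell(x: float, y: float, cell_size: float) -> int | None:
--     """Map a point to a cell in a 4x4 grid.
--
--     Args:
--         x: X coordinate.
--         y: Y coordinate.
--         cell_size: Size of each cell.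
--
--     Returns:
--         Cell number from 1 to 16, or None if out of bounds.
--     """
--     grid_size = cell_size * 4
--
--     if x < 0 or x > grid_size or y < 0 or y > grid_size:
--         return None
--
--     col = min(3, int(x // cell_size))
--     row = min(3, int(y // cell_size))
--
--     return row * 4 + col + 1
--
-- def get_occupied_cells(vertices: list[int], grid_cols: int = 4) -> list[int]:
--     """Get all cells occupied by a shape defined by corner vertices.
--
--     Given the cells containing the corners of a bounding box, returns all cells
--     that the box spans (including cells between corners).
--
--     Args:
--         vertices: List of cell numbers containing the corners.
--         grid_cols: Number of columns in the grid.
--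
--     Returns:
--         Sorted list of all occupied cell numbers.
--     """
--     if not vertices:
--         return []
--
--     # Convert cells to (row, col) coordinates
--     coords = [((v - 1) // grid_cols, (v - 1) % grid_cols) for v in vertices]
--     rows, cols = zip(*coords, strict=True)
--
--     min_row, max_row = min(rows), max(rows)
--     min_col, max_col = min(cols), max(cols)
--
--     occupied = set()
--     for row in range(min_row, max_row + 1):
--         for col in range(min_col, max_col + 1):
--             occupied.add(row * grid_cols + col + 1)
--
--     return sorted(occupied)
-- ===== SOURCE B (Python) =====
-- def calculate_4x4_cells(bbox, grid_size=450):
--     """Axis-separated rewrite: compute valid columns from x1,x2 and valid rows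
--     from y1,y2 independently, then emit the row-range x column-range product."""
--     if grid_size <= 0:
--         raise ValueError(f"grid_size must be positive, got {grid_size}")
--     x1, y1, x2, y2 = bbox
--     cell_size = grid_size / 4
--     cols = [min(3, int(x // cell_size)) for x in (x1, x2) if 0 <= x <= cell_size * 4]
--     rows = [min(3, int(y // cell_size)) for y in (y1, y2) if 0 <= y <= cell_size * 4]
--     if not cols or not rows:
--         return []
--     return sorted(
--         row * 4 + col + 1
--         for row in range(min(rows), max(rows) + 1)
--         for col in range(min(cols), max(cols) + 1)
--     )
-- ===== Notes on version B (the rewrite author's own statement) =====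
-- stated objective: simpler
-- what changed: Replaces A's per-corner cell encoding + decode/zip/set-and-sort bounding pass (get_occupied_cells) by an axis-separated computation: valid column indices from x1,x2 and valid row indices from y1,y2 independently, then the sorted row-range x column-range product, exploiting that a corner survives the bounds check iff its x and y are each in bounds.
import Mathlib
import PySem

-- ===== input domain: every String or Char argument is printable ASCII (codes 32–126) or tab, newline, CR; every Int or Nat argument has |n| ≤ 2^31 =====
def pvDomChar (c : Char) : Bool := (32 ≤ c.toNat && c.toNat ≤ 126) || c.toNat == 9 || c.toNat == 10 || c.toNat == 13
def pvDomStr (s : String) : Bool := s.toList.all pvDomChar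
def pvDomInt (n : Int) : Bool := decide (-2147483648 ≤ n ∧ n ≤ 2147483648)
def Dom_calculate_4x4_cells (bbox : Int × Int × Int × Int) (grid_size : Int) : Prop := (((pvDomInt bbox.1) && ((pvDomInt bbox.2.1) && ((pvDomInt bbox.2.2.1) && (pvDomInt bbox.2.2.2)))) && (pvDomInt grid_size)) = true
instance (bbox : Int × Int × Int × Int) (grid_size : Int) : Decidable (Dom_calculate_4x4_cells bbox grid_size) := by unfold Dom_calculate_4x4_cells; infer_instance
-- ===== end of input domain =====

-- B replaces A's per-corner cell encoding plus decode/set/sort bounding pass by an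
-- axis-separated column/row range computation (simpler decomposition, same cost).


-- ===== PORT A =====
-- _point_to_4x4_cell(x, y, cell_size) with cell_size = g/4 (a Python float).  On the
-- domain (|x|,|y|,|g| ≤ 2^31, g > 0) the float arithmetic is EXACT: g/4 and its
-- multiples k*(g/4) (k ≤ 2^33) are exactly representable doubles, so
-- cell_size*4 == g and int(x // cell_size) == floor(4x/g) = PySem.Int.floordiv (4*x) g
-- exactly; we therefore pass g itself and use integer arithmetic.
def pointTo4x4Cell (x y g : Int) : Option Int :=
  if x < 0 ∨ x > g ∨ y < 0 ∨ y > g then none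
  else
    some ((min 3 (PySem.Int.floordiv (4 * y) g)) * 4
          + (min 3 (PySem.Int.floordiv (4 * x) g)) + 1)

-- get_occupied_cells(vertices, grid_cols); only called with vertices ≠ [], so the
-- .getD 0 defaults on min?/max? (Python min/max of a nonempty list) are never taken.
def getOccupiedCells (vertices : List Int) (gridCols : Int) : List Int :=
  if vertices = [] then []
  else
    let coords := vertices.map (fun v =>
      (PySem.Int.floordiv (v - 1) gridCols, PySem.Int.mod (v - 1) gridCols))
    let rows := coords.map (·.1)
    let cols := coords.map (·.2)
    let minRow := ((PySem.List.min? rows (fun r => r)).getD 0)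
    let maxRow := ((PySem.List.max? rows (fun r => r)).getD 0)
    let minCol := ((PySem.List.min? cols (fun c => c)).getD 0)
    let maxCol := ((PySem.List.max? cols (fun c => c)).getD 0)
    let occupied : PySem.Set Int :=
      (PySem.List.pyRange minRow (maxRow + 1) 1).foldl (fun s row =>
        (PySem.List.pyRange minCol (maxCol + 1) 1).foldl (fun s col =>
          PySem.Set.add s (row * gridCols + col + 1)) s) PySem.Set.empty
    PySem.List.sorted occupied (fun v => v) false

def calculate_4x4_cells (bbox : Int × Int × Int × Int) (grid_size : Int) : List Int :=
  if grid_size ≤ 0 then []  -- Python raises ValueError here; excluded by Pre_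
  else
    match bbox with
    | (x1, y1, x2, y2) =>
      let corners := [(x1, y1), (x2, y1), (x1, y2), (x2, y2)]
      let cornerCells := corners.foldl (fun acc c =>
        match pointTo4x4Cell c.1 c.2 grid_size with
        | some cell => acc ++ [cell]
        | none => acc) []
      if cornerCells = [] then [] else getOccupiedCells cornerCells 4

-- ===== PORT B =====
-- the per-axis comprehension: [min(3, int(t // cell_size)) for t in (a, b) if 0 <= t <= cell_size*4]
-- (same float-exactness note as for port A: cell_size*4 == g, t // cell_size == floor(4t/g))
def altAxisCells (a b g : Int) : List Int :=
  (([a, b]).filter (fun t => decide (0 ≤ t ∧ t ≤ g))).map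
    (fun t => min 3 (PySem.Int.floordiv (4 * t) g))

def altGridCells (cols rows : List Int) : List Int :=
  if cols = [] ∨ rows = [] then []
  else
    let minCol := ((PySem.List.min? cols (fun c => c)).getD 0)
    let maxCol := ((PySem.List.max? cols (fun c => c)).getD 0)
    let minRow := ((PySem.List.min? rows (fun r => r)).getD 0)
    let maxRow := ((PySem.List.max? rows (fun r => r)).getD 0)
    PySem.List.sorted
      ((PySem.List.pyRange minRow (maxRow + 1) 1).flatMap (fun row =>
        (PySem.List.pyRange minCol (maxCol + 1) 1).map (fun col =>
          row * 4 + col + 1)))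
      (fun v => v) false

def calculate_4x4_cells_alt (bbox : Int × Int × Int × Int) (grid_size : Int) : List Int :=
  if grid_size ≤ 0 then []  -- Python raises ValueError here; excluded by Pre_
  else
    match bbox with
    | (x1, y1, x2, y2) =>
      altGridCells (altAxisCells x1 x2 grid_size) (altAxisCells y1 y2 grid_size)

-- ===== PRECONDITION & SPEC =====
-- Pre_ excludes exactly grid_size ≤ 0, where the Python A raises ValueError.
def Pre_calculate_4x4_cells (bbox : Int × Int × Int × Int) (grid_size : Int) : Prop := 0 < grid_size
instance (bbox : Int × Int × Int × Int) (grid_size : Int) : Decidable (Pre_calculate_4x4_cells bbox grid_size) := by unfold Pre_calculate_4x4_cells; infer_instance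
def pvWitness_calculate_4x4_cells : (Int × Int × Int × Int) × Int := ((10, 10, 200, 380), 450)

def Spec_calculate_4x4_cells (bbox : Int × Int × Int × Int) (grid_size : Int) (out : List Int) : Prop := out = calculate_4x4_cells_alt bbox grid_size
instance (bbox : Int × Int × Int × Int) (grid_size : Int) (out : List Int) : Decidable (Spec_calculate_4x4_cells bbox grid_size out) := by unfold Spec_calculate_4x4_cells; infer_instance

-- ===== CLAIM (what is proved, stated in full; the proofs are below) =====
def Claim_equal_calculate_4x4_cells : Prop := ∀ (bbox : Int × Int × Int × Int) (grid_size : Int), Dom_calculate_4x4_cells bbox grid_size → Pre_calculate_4x4_cells bbox grid_size → Spec_calculate_4x4_cells bbox grid_size (calculate_4x4_cells bbox grid_size)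

-- ===== LEMMAS AND PROOFS =====

-- A's corner_cells as a function of the four per-axis validity flags and the four
-- clamped indices (a=col(x1), b=col(x2), c=row(y1), d=row(y2)); corner order (x1,y1),(x2,y1),(x1,y2),(x2,y2).
def cellsE (p q r s : Bool) (a b c d : Int) : List Int :=
  (if p && r then [c * 4 + a + 1] else []) ++
  (if q && r then [c * 4 + b + 1] else []) ++
  (if p && s then [d * 4 + a + 1] else []) ++
  (if q && s then [d * 4 + b + 1] else [])

-- B's per-axis list as a function of the flags and clamped indices.
def axisE (p q : Bool) (a b : Int) : List Int :=
  (if p then [a] else []) ++ (if q then [b] else [])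

-- the shared tail computation, on Fin-4 indices: one 4096-case kernel evaluation
lemma tail_eq_fin : ∀ (p q r s : Bool) (a b c d : Fin 4),
    (if cellsE p q r s (a.1 : Int) (b.1 : Int) (c.1 : Int) (d.1 : Int) = [] then []
     else getOccupiedCells (cellsE p q r s (a.1 : Int) (b.1 : Int) (c.1 : Int) (d.1 : Int)) 4)
    = altGridCells (axisE p q (a.1 : Int) (b.1 : Int)) (axisE r s (c.1 : Int) (d.1 : Int)) := by
  decide

lemma tail_eq_int (p q r s : Bool) (a b c d : Int)
    (ha : 0 ≤ a ∧ a ≤ 3) (hb : 0 ≤ b ∧ b ≤ 3) (hc : 0 ≤ c ∧ c ≤ 3) (hd : 0 ≤ d ∧ d ≤ 3) :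
    (if cellsE p q r s a b c d = [] then []
     else getOccupiedCells (cellsE p q r s a b c d) 4)
    = altGridCells (axisE p q a b) (axisE r s c d) := by
  obtain ⟨a', ha'⟩ : ∃ a' : Fin 4, a = (a'.1 : Int) := ⟨⟨a.toNat, by omega⟩, by simp; omega⟩
  obtain ⟨b', hb'⟩ : ∃ b' : Fin 4, b = (b'.1 : Int) := ⟨⟨b.toNat, by omega⟩, by simp; omega⟩
  obtain ⟨c', hc'⟩ : ∃ c' : Fin 4, c = (c'.1 : Int) := ⟨⟨c.toNat, by omega⟩, by simp; omega⟩
  obtain ⟨d', hd'⟩ : ∃ d' : Fin 4, d = (d'.1 : Int) := ⟨⟨d.toNat, by omega⟩, by simp; omega⟩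
  subst ha' hb' hc' hd'
  exact tail_eq_fin p q r s a' b' c' d'

lemma clamp_bounds (x g : Int) (hg : 0 < g) (hx : 0 ≤ x) :
    0 ≤ min 3 (PySem.Int.floordiv (4 * x) g) ∧ min 3 (PySem.Int.floordiv (4 * x) g) ≤ 3 := by
  constructor
  · have h4 : (0:Int) ≤ 4 * x := by omega
    have := PySem.Int.le_floordiv_iff_mul_le (a := 4 * x) (b := g) (q := 0) hg
    simp at this
    omega
  · exact min_le_left _ _

lemma pointTo_eq (x y g : Int) :
    pointTo4x4Cell x y g
      = if (0 ≤ x ∧ x ≤ g) ∧ (0 ≤ y ∧ y ≤ g) then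
          some ((min 3 (PySem.Int.floordiv (4 * y) g)) * 4
                + (min 3 (PySem.Int.floordiv (4 * x) g)) + 1)
        else none := by
  unfold pointTo4x4Cell
  split_ifs <;> first | rfl | omega

-- ===== VERDICT (by name: the statement is the Claim_ definition above) =====
theorem calculate_4x4_cells_spec : Claim_equal_calculate_4x4_cells := by
  intro bbox g _ hg
  obtain ⟨x1, y1, x2, y2⟩ := bbox
  unfold Spec_calculate_4x4_cells
  have hgne : ¬ g ≤ 0 := not_le.mpr hg
  have hcells :
      ([(x1, y1), (x2, y1), (x1, y2), (x2, y2)] : List (Int × Int)).foldl (fun acc c =>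
        match pointTo4x4Cell c.1 c.2 g with
        | some cell => acc ++ [cell]
        | none => acc) []
      = cellsE (decide (0 ≤ x1 ∧ x1 ≤ g)) (decide (0 ≤ x2 ∧ x2 ≤ g))
               (decide (0 ≤ y1 ∧ y1 ≤ g)) (decide (0 ≤ y2 ∧ y2 ≤ g))
               (if 0 ≤ x1 ∧ x1 ≤ g then min 3 (PySem.Int.floordiv (4 * x1) g) else 0)
               (if 0 ≤ x2 ∧ x2 ≤ g then min 3 (PySem.Int.floordiv (4 * x2) g) else 0)
               (if 0 ≤ y1 ∧ y1 ≤ g then min 3 (PySem.Int.floordiv (4 * y1) g) else 0)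
               (if 0 ≤ y2 ∧ y2 ≤ g then min 3 (PySem.Int.floordiv (4 * y2) g) else 0) := by
    by_cases hp : 0 ≤ x1 ∧ x1 ≤ g <;> by_cases hq : 0 ≤ x2 ∧ x2 ≤ g <;>
      by_cases hr : 0 ≤ y1 ∧ y1 ≤ g <;> by_cases hs : 0 ≤ y2 ∧ y2 ≤ g <;>
      simp [pointTo_eq, cellsE, hp, hq, hr, hs, List.foldl]
  have haxisx : altAxisCells x1 x2 g
      = axisE (decide (0 ≤ x1 ∧ x1 ≤ g)) (decide (0 ≤ x2 ∧ x2 ≤ g))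
              (if 0 ≤ x1 ∧ x1 ≤ g then min 3 (PySem.Int.floordiv (4 * x1) g) else 0)
              (if 0 ≤ x2 ∧ x2 ≤ g then min 3 (PySem.Int.floordiv (4 * x2) g) else 0) := by
    by_cases hp : 0 ≤ x1 ∧ x1 ≤ g <;> by_cases hq : 0 ≤ x2 ∧ x2 ≤ g <;>
      simp [altAxisCells, axisE, hp, hq]
  have haxisy : altAxisCells y1 y2 g
      = axisE (decide (0 ≤ y1 ∧ y1 ≤ g)) (decide (0 ≤ y2 ∧ y2 ≤ g))
              (if 0 ≤ y1 ∧ y1 ≤ g then min 3 (PySem.Int.floordiv (4 * y1) g) else 0)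
              (if 0 ≤ y2 ∧ y2 ≤ g then min 3 (PySem.Int.floordiv (4 * y2) g) else 0) := by
    by_cases hr : 0 ≤ y1 ∧ y1 ≤ g <;> by_cases hs : 0 ≤ y2 ∧ y2 ≤ g <;>
      simp [altAxisCells, axisE, hr, hs]
  have bnd : ∀ x : Int, 0 ≤ (if 0 ≤ x ∧ x ≤ g then min 3 (PySem.Int.floordiv (4 * x) g) else 0)
      ∧ (if 0 ≤ x ∧ x ≤ g then min 3 (PySem.Int.floordiv (4 * x) g) else 0) ≤ 3 := by
    intro x
    by_cases hx : 0 ≤ x ∧ x ≤ g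
    · simpa [hx] using clamp_bounds x g hg hx.1
    · simp [hx]
  show calculate_4x4_cells (x1, y1, x2, y2) g = calculate_4x4_cells_alt (x1, y1, x2, y2) g
  simp only [calculate_4x4_cells, calculate_4x4_cells_alt, if_neg hgne]
  rw [hcells, haxisx, haxisy]
  exact tail_eq_int _ _ _ _ _ _ _ _ (bnd x1) (bnd x2) (bnd y1) (bnd y2)
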